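-- pv_equiv track=rewrite | github.com/Samborka/INE5452---T-picos-Especiais-em-Algoritmos-II | lista1/play23.py | find_lowest_winning_card
-- ===== SOURCE A (Python) =====
-- def calculate_score(cards):
--     score = sum(min(card, 10) for card in cards)
--     return score
--
-- def find_lowest_winning_card(N, john_cards, mary_cards, common_cards):
--     # Calcular a pontuação atual de John e Mary
--     john_score = calculate_score(john_cards)
--     mary_score = calculate_score(mary_cards)
--
--     # Adicionar as cartas comuns à pontuação de cada jogador
--     for card in common_cards:
--         john_score += min(card, 10)
--         mary_score += min(card, 10)
--
--     # Encontrar o valor mínimo da carta para Mary vencer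
--     lowest_card = -1
--     for card in range(1, 14):
--         if mary_score + min(card, 10) <= 23:
--             lowest_card = card
--
--     return lowest_card
-- ===== SOURCE B (Python) =====
-- def find_lowest_winning_card(N, john_cards, mary_cards, common_cards):
--     mary_score = sum(min(c, 10) for c in mary_cards) + sum(min(c, 10) for c in common_cards)
--     limit = 23 - mary_score
--     if limit < 1:
--         return -1
--     if limit >= 10:
--         return 13
--     return limit
-- ===== Notes on version B (the rewrite author's own statement) =====
-- stated objective: simpler
-- what changed: Replaced the 13-iteration scan over candidate cards with a closed-form answer on limit = 23 - mary_score (-1 if limit < 1, 13 if limit >= 10, else limit), and dropped the unused john_score computation.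
import Mathlib
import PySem

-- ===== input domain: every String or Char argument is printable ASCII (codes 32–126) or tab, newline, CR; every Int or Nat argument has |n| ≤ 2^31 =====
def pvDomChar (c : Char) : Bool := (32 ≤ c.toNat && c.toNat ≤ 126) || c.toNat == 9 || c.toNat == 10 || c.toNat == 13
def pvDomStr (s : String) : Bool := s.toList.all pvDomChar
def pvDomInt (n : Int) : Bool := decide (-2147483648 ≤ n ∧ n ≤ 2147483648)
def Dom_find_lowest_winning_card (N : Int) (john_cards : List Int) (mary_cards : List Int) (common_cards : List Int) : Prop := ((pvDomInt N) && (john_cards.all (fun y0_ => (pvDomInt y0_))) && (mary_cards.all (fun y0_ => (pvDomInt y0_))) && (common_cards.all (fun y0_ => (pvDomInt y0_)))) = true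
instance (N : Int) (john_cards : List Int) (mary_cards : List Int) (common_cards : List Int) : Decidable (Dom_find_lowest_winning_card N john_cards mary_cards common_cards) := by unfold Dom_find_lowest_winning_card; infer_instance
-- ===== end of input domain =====

-- B computes the answer as a closed form on 23 - mary_score instead of scanning the 13 candidate cards, and omits the unused john_score (objective: simpler).


-- ===== PORT A =====
def calculate_score (cards : List Int) : Int :=
  cards.foldl (fun score card => score + min card 10) 0

def find_lowest_winning_card (N : Int) (john_cards : List Int) (mary_cards : List Int) (common_cards : List Int) : Int :=
  let john_score := calculate_score john_cards
  let mary_score := calculate_score mary_cards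
  let st := common_cards.foldl
    (fun (st : Int × Int) card => (st.1 + min card 10, st.2 + min card 10))
    (john_score, mary_score)
  (PySem.List.pyRange 1 14 1).foldl
    (fun lowest_card card => if st.2 + min card 10 ≤ 23 then card else lowest_card)
    (-1)

-- ===== PORT B =====
def capped_sum (cards : List Int) : Int :=
  cards.foldl (fun s c => s + min c 10) 0

def find_lowest_winning_card_alt (N : Int) (john_cards : List Int) (mary_cards : List Int) (common_cards : List Int) : Int :=
  let mary_score := capped_sum mary_cards + capped_sum common_cards
  let limit := 23 - mary_score
  if limit < 1 then -1
  else if limit ≥ 10 then 13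
  else limit

-- ===== PRECONDITION & SPEC =====
def Spec_find_lowest_winning_card (N : Int) (john_cards : List Int) (mary_cards : List Int) (common_cards : List Int) (out : Int) : Prop := out = find_lowest_winning_card_alt N john_cards mary_cards common_cards
instance (N : Int) (john_cards : List Int) (mary_cards : List Int) (common_cards : List Int) (out : Int) : Decidable (Spec_find_lowest_winning_card N john_cards mary_cards common_cards out) := by unfold Spec_find_lowest_winning_card; infer_instance

-- ===== CLAIM (what is proved, stated in full; the proofs are below) =====
def Claim_equal_find_lowest_winning_card : Prop := ∀ (N : Int) (john_cards : List Int) (mary_cards : List Int) (common_cards : List Int), Dom_find_lowest_winning_card N john_cards mary_cards common_cards → Spec_find_lowest_winning_card N john_cards mary_cards common_cards (find_lowest_winning_card N john_cards mary_cards common_cards)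

-- ===== LEMMAS AND PROOFS =====

-- Shifting the start of the capped-sum fold.
theorem capped_shift (cs : List Int) (x : Int) :
    cs.foldl (fun s c => s + min c 10) x = x + cs.foldl (fun s c => s + min c 10) 0 := by
  induction cs generalizing x with
  | nil => simp
  | cons c cs ih =>
      simp only [List.foldl_cons]
      rw [ih (x + min c 10), ih (0 + min c 10)]
      ring

-- A's pair fold adds the capped common-card sum to the second component.
theorem pair_fold_snd (cs : List Int) (a b : Int) :
    (cs.foldl (fun (st : Int × Int) card => (st.1 + min card 10, st.2 + min card 10)) (a, b)).2
      = b + cs.foldl (fun s c => s + min c 10) 0 := by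
  induction cs generalizing a b with
  | nil => simp
  | cons c cs ih =>
      simp only [List.foldl_cons, ih]
      rw [capped_shift cs (0 + min c 10)]
      ring

-- The 13-step scan over range(1,14) equals the closed form on s.
theorem scan_closed (s : Int) :
    (PySem.List.pyRange 1 14 1).foldl
      (fun lowest_card card => if s + min card 10 ≤ 23 then card else lowest_card) (-1)
      = if 23 - s < 1 then -1 else if 23 - s ≥ 10 then 13 else 23 - s := by
  have h : PySem.List.pyRange 1 14 1 = [1,2,3,4,5,6,7,8,9,10,11,12,13] := by decide
  rw [h]
  simp only [List.foldl_cons, List.foldl_nil]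
  norm_num
  split_ifs <;> omega

-- ===== VERDICT (by name: the statement is the Claim_ definition above) =====
theorem find_lowest_winning_card_spec : Claim_equal_find_lowest_winning_card := by
  intro N j m c _
  unfold Spec_find_lowest_winning_card find_lowest_winning_card find_lowest_winning_card_alt
  simp only [pair_fold_snd]
  rw [scan_closed]
  unfold calculate_score capped_sum
  ring_nf
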